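-- pv_equiv track=rewrite | github.com/jpinglove/enex2notion | enex2notion/notion_blocks/text.py | _rstrip_properties
-- ===== SOURCE A (Python) =====
-- def _rstrip_properties(properties):
--     strip_properties = []
--
--     for i, prop in sorted(enumerate(properties), reverse=True):
--         if not prop[0].strip():
--             continue
--
--         strip_properties.extend(properties[:i])
--
--         if len(prop) == 1:
--             strip_properties.append([prop[0].rstrip()])
--         else:
--             strip_properties.append([prop[0].rstrip(), prop[1]])
--
--         break
--
--     return strip_properties
-- ===== SOURCE B (Python) =====
-- def _rstrip_properties(properties):
--     # One forward pass with a deferral buffer instead of scanning from the end.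
--     result = []
--     pending = []
--     for prop in properties:
--         if prop and prop[0].strip():
--             result.extend(pending)
--             pending = []
--             result.append(prop)
--         else:
--             pending.append(prop)
--     # whatever is still pending is the trailing blank run: drop it
--     if not result:
--         return []
--     last = result[-1]
--     if len(last) == 1:
--         result[-1] = [last[0].rstrip()]
--     else:
--         result[-1] = [last[0].rstrip(), last[1]]
--     return result
-- ===== Notes on version B (the rewrite author's own statement) =====
-- stated objective: alternative
-- what changed: Replaces the reverse sort over enumerate plus prefix slice with a single forward pass that defers possibly-trailing blank props in a pending buffer and drops the buffer at the end.
-- crash fix: A raises IndexError when an empty inner list occurs in the trailing segment scanned from the end (i.e. with no prop after it whose first string strips to non-empty); B treats an empty prop like a blank one and returns the properly r-stripped list there. — e.g. on _rstrip_properties([["a"], []]): A raises IndexError, B returns [["a"]]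
import Mathlib
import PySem

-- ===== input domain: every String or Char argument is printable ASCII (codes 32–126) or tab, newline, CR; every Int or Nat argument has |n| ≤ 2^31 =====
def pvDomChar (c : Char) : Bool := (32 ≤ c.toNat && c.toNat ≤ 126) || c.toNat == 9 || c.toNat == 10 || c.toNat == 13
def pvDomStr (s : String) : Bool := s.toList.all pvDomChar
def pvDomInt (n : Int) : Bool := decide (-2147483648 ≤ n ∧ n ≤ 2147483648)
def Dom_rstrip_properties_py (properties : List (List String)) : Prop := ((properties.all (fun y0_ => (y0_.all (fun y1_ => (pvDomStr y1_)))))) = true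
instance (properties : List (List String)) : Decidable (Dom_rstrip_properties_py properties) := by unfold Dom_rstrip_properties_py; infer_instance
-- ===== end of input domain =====

-- B replaces A's reverse-sorted scan + prefix slice by one forward pass with a deferral
-- buffer for possibly-trailing blank props (objective: alternative decomposition).

-- ===== PORT A =====
-- A's loop with `break`: recursion over the sorted enumerated list that returns at the
-- first prop whose first string strips non-empty.  prop[0] is pyGet?; on none Python
-- raises IndexError (excluded by Pre_), the port returns [] there (unreachable on Pre_).
def rstrip_properties_py_goA (ps : List (List String)) : List (Int × List String) → List (List String)
  | [] => []
  | (i, prop) :: rest =>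
    match PySem.List.pyGet? prop 0 with
    | none => []  -- Python: IndexError (outside Pre_)
    | some s =>
      if PySem.Str.strip s == "" then rstrip_properties_py_goA ps rest
      else
        PySem.List.slice ps (some 0) (some i) ++
          [if prop.length == 1 then [PySem.Str.rstrip s]
           else [PySem.Str.rstrip s, PySem.List.pyGetD prop 1 ""]]

-- sorted(enumerate(properties), reverse=True): the Int indices are pairwise distinct, so
-- Python's tuple comparison here is comparison of the first components; ported as a
-- stable reverse sort keyed on the index.
def rstrip_properties_py (properties : List (List String)) : List (List String) :=
  rstrip_properties_py_goA properties
    (PySem.List.sorted (PySem.List.enumerate properties 0) (fun x => x.1) true)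

-- ===== PORT B =====
-- forward pass: `result` and the `pending` buffer of deferred (possibly trailing) blanks
def rstrip_properties_py_goB : List (List String) → List (List String) → List (List String) → List (List String)
  | [], result, _pending => result   -- leftover pending = trailing blank run, dropped
  | prop :: rest, result, pending =>
    if !prop.isEmpty && !(PySem.Str.strip (prop.headD "") == "") then
      rstrip_properties_py_goB rest (result ++ pending ++ [prop]) []
    else
      rstrip_properties_py_goB rest result (pending ++ [prop])

def rstrip_properties_py_alt (properties : List (List String)) : List (List String) :=
  let result := rstrip_properties_py_goB properties [] []
  match result.getLast? with
  | none => []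
  | some last =>
    result.dropLast ++
      [if last.length == 1 then [PySem.Str.rstrip (last.headD "")]
       else [PySem.Str.rstrip (last.headD ""), PySem.List.pyGetD last 1 ""]]

-- ===== PRECONDITION & SPEC =====
-- A scans props from the end down to the first one whose first string strips non-empty,
-- and raises IndexError on an empty prop met during that scan; Pre_ excludes exactly
-- those inputs (every empty prop must be followed by a later non-blank prop).
def Pre_rstrip_properties_py (properties : List (List String)) : Prop :=
  ∀ j < properties.length, properties.getD j [] = [] →
    ∃ k < properties.length, j < k ∧ properties.getD k [] ≠ [] ∧
      PySem.Str.strip ((properties.getD k []).headD "") ≠ ""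
instance (properties : List (List String)) : Decidable (Pre_rstrip_properties_py properties) := by
  unfold Pre_rstrip_properties_py; infer_instance

def pvWitness_rstrip_properties_py : List (List String) := [["a"], [" "]]

-- A raises IndexError whenever some empty prop has no later prop whose first string
-- strips non-empty; B treats an empty prop like a blank one and returns the r-stripped list.
def Raises_rstrip_properties_py (properties : List (List String)) : Prop :=
  ∃ j < properties.length, properties.getD j [] = [] ∧
    ∀ k < properties.length, j < k → (properties.getD k [] = [] ∨
      PySem.Str.strip ((properties.getD k []).headD "") = "")
instance (properties : List (List String)) : Decidable (Raises_rstrip_properties_py properties) := by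
  unfold Raises_rstrip_properties_py; infer_instance

def pvRaiseWitness_rstrip_properties_py : List (List String) := [["a"], []]
def pvRaiseWitnessOut_rstrip_properties_py : List (List String) := [["a"]]

def Spec_rstrip_properties_py (properties : List (List String)) (out : List (List String)) : Prop := out = rstrip_properties_py_alt properties
instance (properties : List (List String)) (out : List (List String)) : Decidable (Spec_rstrip_properties_py properties out) := by unfold Spec_rstrip_properties_py; infer_instance

-- ===== CLAIM (what is proved, stated in full; the proofs are below) =====
def Claim_equal_rstrip_properties_py : Prop := ∀ (properties : List (List String)), Dom_rstrip_properties_py properties → Pre_rstrip_properties_py properties → Spec_rstrip_properties_py properties (rstrip_properties_py properties)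
def Claim_raises_rstrip_properties_py : Prop := (∀ (properties : List (List String)), Dom_rstrip_properties_py properties → Raises_rstrip_properties_py properties → ¬ Pre_rstrip_properties_py properties) ∧ (Dom_rstrip_properties_py (pvRaiseWitness_rstrip_properties_py) ∧ Raises_rstrip_properties_py (pvRaiseWitness_rstrip_properties_py) ∧ rstrip_properties_py_alt (pvRaiseWitness_rstrip_properties_py) = pvRaiseWitnessOut_rstrip_properties_py)

-- ===== LEMMAS AND PROOFS =====

def pvGood (p : List String) : Bool :=
  !p.isEmpty && !(PySem.Str.strip (p.headD "") == "")

def pvAnyGood (ps : List (List String)) : Bool := ps.any pvGood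

-- the prefix of ps up to and including its last good element ([] if none)
def pvK : List (List String) → List (List String)
  | [] => []
  | p :: rest => if pvAnyGood rest then p :: pvK rest else if pvGood p then [p] else []

lemma pvAnyGood_cons (p : List String) (ps : List (List String)) :
    pvAnyGood (p :: ps) = (pvGood p || pvAnyGood ps) := by
  simp [pvAnyGood]

lemma pvAnyGood_append_singleton (ps : List (List String)) (p : List String) :
    pvAnyGood (ps ++ [p]) = (pvAnyGood ps || pvGood p) := by
  simp [pvAnyGood]

lemma pvK_append_good (ps : List (List String)) (p : List String) (h : pvGood p = true) :
    pvK (ps ++ [p]) = ps ++ [p] := by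
  induction ps with
  | nil => simp [pvK, pvAnyGood, h]
  | cons q rest ih =>
      simp only [List.cons_append, pvK, pvAnyGood_append_singleton, h, Bool.or_true,
        if_true, ih]

lemma pvK_append_bad (ps : List (List String)) (p : List String) (h : pvGood p = false) :
    pvK (ps ++ [p]) = pvK ps := by
  induction ps with
  | nil => simp [pvK, pvAnyGood, h]
  | cons q rest ih =>
      simp only [List.cons_append, pvK, pvAnyGood_append_singleton, h, Bool.or_false, ih]

lemma goB_spec (l res pend : List (List String)) :
    rstrip_properties_py_goB l res pend =
      res ++ (if pvAnyGood l then pend ++ pvK l else []) := by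
  induction l generalizing res pend with
  | nil => simp [rstrip_properties_py_goB, pvAnyGood]
  | cons p rest ih =>
      have hg : (!p.isEmpty && !(PySem.Str.strip (p.headD "") == "")) = pvGood p := rfl
      simp only [rstrip_properties_py_goB, hg]
      by_cases h : pvGood p = true
      · simp only [h, if_true, ih, pvK, pvAnyGood_cons, Bool.true_or, if_true]
        by_cases h2 : pvAnyGood rest = true <;> simp [h2]
      · have h' : pvGood p = false := by simpa using h
        simp only [h', Bool.false_eq_true, if_false, ih, pvK, pvAnyGood_cons, Bool.false_or]
        by_cases h2 : pvAnyGood rest = true <;> simp [h2]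

-- B expressed through pvK
lemma alt_eq (ps : List (List String)) :
    rstrip_properties_py_alt ps =
      (match (if pvAnyGood ps then pvK ps else ([] : List (List String))).getLast? with
       | none => []
       | some last =>
         (if pvAnyGood ps then pvK ps else ([] : List (List String))).dropLast ++
           [if last.length == 1 then [PySem.Str.rstrip (last.headD "")]
            else [PySem.Str.rstrip (last.headD ""), PySem.List.pyGetD last 1 ""]]) := by
  unfold rstrip_properties_py_alt
  rw [goB_spec]
  simp only [List.nil_append]

-- goA ignores the last element of its list argument when all indices are below its length
lemma goA_drop_last (l : List (Int × List String)) (ps : List (List String)) (p : List String)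
    (h : ∀ x ∈ l, ∃ k : Nat, x.1 = (k : Int) ∧ k ≤ ps.length) :
    rstrip_properties_py_goA (ps ++ [p]) l = rstrip_properties_py_goA ps l := by
  induction l with
  | nil => rfl
  | cons x rest ih =>
      obtain ⟨k, hk1, hk2⟩ := h x (List.mem_cons_self ..)
      obtain ⟨i, prop⟩ := x
      simp only at hk1
      subst hk1
      simp only [rstrip_properties_py_goA]
      cases PySem.List.pyGet? prop 0 with
      | none => rfl
      | some s =>
          simp only
          by_cases hs : (PySem.Str.strip s == "") = true
          · simp only [hs, if_true]
            exact ih (fun y hy => h y (List.mem_cons_of_mem _ hy))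
          · simp only [hs, Bool.false_eq_true, if_false]
            rw [PySem.List.slice_zero_start, PySem.List.slice_zero_start,
              PySem.List.slice_to_natCast, PySem.List.slice_to_natCast,
              List.take_append_of_le_length hk2]

lemma enum_mem_bound (ps : List (List String)) :
    ∀ x ∈ (PySem.List.enumerate ps 0).reverse, ∃ k : Nat, x.1 = (k : Int) ∧ k ≤ ps.length := by
  intro x hx
  rw [List.mem_reverse] at hx
  rw [PySem.List.mem_enumerate_iff] at hx
  obtain ⟨k, hk, rfl⟩ := hx
  exact ⟨k, by simp, Nat.le_of_lt hk⟩

lemma sorted_enum (ps : List (List String)) :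
    PySem.List.sorted (PySem.List.enumerate ps 0) (fun x => x.1) true =
      (PySem.List.enumerate ps 0).reverse := by
  apply PySem.List.sorted_rev_eq_of_perm_of_pairwise_gt
  · exact List.reverse_perm _
  · rw [List.pairwise_reverse]
    exact PySem.List.pairwise_lt_enumerate ps 0

lemma pre_drop (ps : List (List String)) (p : List String) (hp : pvGood p = false)
    (h : Pre_rstrip_properties_py (ps ++ [p])) : Pre_rstrip_properties_py ps := by
  intro j hj hnil
  have hj' : j < (ps ++ [p]).length := by simp; omega
  have hnil' : (ps ++ [p]).getD j [] = [] := by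
    rwa [List.getD_append _ _ _ _ hj]
  obtain ⟨k, hk, hjk, hne, hstr⟩ := h j hj' hnil'
  have hklt : k < ps.length := by
    rcases Nat.lt_or_ge k ps.length with h' | h'
    · exact h'
    · exfalso
      have hk' : k = ps.length := by simp at hk; omega
      have : (ps ++ [p]).getD k [] = p := by
        subst hk'
        simp [List.getD_eq_getElem?_getD]
      rw [this] at hne hstr
      -- p is not good, but hne/hstr say it is
      unfold pvGood at hp
      rcases Bool.and_eq_false_iff.mp hp with h1 | h1
      · exact hne (by simpa using h1)
      · exact hstr (by simpa using h1)
  refine ⟨k, hklt, hjk, ?_, ?_⟩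
  · rwa [List.getD_append _ _ _ _ hklt] at hne
  · rwa [List.getD_append _ _ _ _ hklt] at hstr

lemma pre_no_empty_last (ps : List (List String))
    (h : Pre_rstrip_properties_py (ps ++ [[]])) : False := by
  have hj : ps.length < (ps ++ [([] : List String)]).length := by simp
  have hnil : (ps ++ [([] : List String)]).getD ps.length [] = [] := by
    simp [List.getD_eq_getElem?_getD]
  obtain ⟨k, hk, hjk, _, _⟩ := h ps.length hj hnil
  simp at hk
  omega

-- the core: A equals B's pvK characterisation, by induction from the right
lemma core (ps : List (List String)) (h : Pre_rstrip_properties_py ps) :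
    rstrip_properties_py_goA ps ((PySem.List.enumerate ps 0).reverse) =
      rstrip_properties_py_alt ps := by
  induction ps using List.reverseRecOn with
  | nil => simp [rstrip_properties_py_goA, rstrip_properties_py_alt, rstrip_properties_py_goB]
  | append_singleton ps p ih =>
      rw [alt_eq]
      have henum : (PySem.List.enumerate (ps ++ [p]) 0).reverse =
          ((ps.length : Int), p) :: (PySem.List.enumerate ps 0).reverse := by
        rw [PySem.List.enumerate_append]
        simp [PySem.List.enumerate]
      rw [henum]
      simp only [rstrip_properties_py_goA]
      match hp : p with
      | [] =>
          exact absurd h (fun hh => pre_no_empty_last ps hh)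
      | s :: t =>
          rw [PySem.List.pyGet?_zero]
          simp only [List.getElem?_cons_zero]
          by_cases hs : (PySem.Str.strip s == "") = true
          · -- blank last prop: A skips it, B defers and drops it
            have hg : pvGood (s :: t) = false := by
              simp [pvGood, hs]
            have hpre : Pre_rstrip_properties_py ps := pre_drop ps (s :: t) hg h
            simp only [hs, if_true]
            rw [goA_drop_last _ ps (s :: t) (enum_mem_bound ps)]
            rw [ih hpre, alt_eq]
            rw [pvK_append_bad ps (s :: t) hg, pvAnyGood_append_singleton, hg, Bool.or_false]
          · -- good last prop
            have hg : pvGood (s :: t) = true := by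
              simp [pvGood]
              simpa using hs
            simp only [hs, Bool.false_eq_true, if_false]
            rw [pvAnyGood_append_singleton, hg, Bool.or_true]
            rw [pvK_append_good ps (s :: t) hg]
            simp only [if_true, List.getLast?_concat, List.dropLast_concat]
            rw [PySem.List.slice_zero_start, PySem.List.slice_to_natCast, List.take_left]
            simp only [List.headD_cons]

-- ===== VERDICT (by name: the statement is the Claim_ definition above) =====
theorem rstrip_properties_py_spec : Claim_equal_rstrip_properties_py := by
  intro ps _hdom hpre
  unfold Spec_rstrip_properties_py
  unfold rstrip_properties_py
  rw [sorted_enum]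
  exact core ps hpre

def rstrip_properties_py_raises : Claim_raises_rstrip_properties_py := by
  unfold Claim_raises_rstrip_properties_py
  constructor
  · intro ps _hdom hraises hpre
    obtain ⟨j, hj, hnil, hall⟩ := hraises
    obtain ⟨k, hk, hjk, hne, hstr⟩ := hpre j hj hnil
    rcases hall k hk hjk with h | h
    · exact hne h
    · exact hstr h
  · exact ⟨by decide, by decide, by decide⟩
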